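-- pv_equiv track=rewrite | github.com/ai-cherry/sophia-strategic-development | backend/services/enhanced_ingestion_service.py | _auto_categorize_content
-- ===== SOURCE A (Python) =====
-- def _auto_categorize_content(filename: str, content: str) -> str:
--     """Auto-categorize content based on filename and content analysis"""
--     filename_lower = filename.lower()
--     content_lower = content.lower()
--
--     # Customer-related keywords
--     if any(keyword in filename_lower or keyword in content_lower
--            for keyword in ['customer', 'client', 'contact', 'company', 'tenant']):
--         return "customers"
--
--     # Product-related keywords
--     elif any(keyword in filename_lower or keyword in content_lower
--             for keyword in ['product', 'service', 'feature', 'solution', 'offering']):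
--         return "products"
--
--     # Employee-related keywords
--     elif any(keyword in filename_lower or keyword in content_lower
--             for keyword in ['employee', 'staff', 'team', 'personnel', 'hr']):
--         return "employees"
--
--     # Financial keywords
--     elif any(keyword in filename_lower or keyword in content_lower
--             for keyword in ['financial', 'revenue', 'budget', 'accounting']):
--         return "financial"
--
--     # Process keywords
--     elif any(keyword in filename_lower or keyword in content_lower
--             for keyword in ['process', 'procedure', 'workflow', 'manual']):
--         return "processes"
--
--     else:
--         return "general"
-- ===== SOURCE B (Python) =====
-- # B: one reverse-priority pass over a flat (keyword, category) list with an
-- # overwrite accumulator: a later (higher-priority) matching keyword overwrites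
-- # the current answer; no groups, no short-circuit.
-- _KEYWORD_CATEGORY = [
--     ("process", "processes"), ("procedure", "processes"),
--     ("workflow", "processes"), ("manual", "processes"),
--     ("financial", "financial"), ("revenue", "financial"),
--     ("budget", "financial"), ("accounting", "financial"),
--     ("employee", "employees"), ("staff", "employees"),
--     ("team", "employees"), ("personnel", "employees"), ("hr", "employees"),
--     ("product", "products"), ("service", "products"),
--     ("feature", "products"), ("solution", "products"),
--     ("offering", "products"),
--     ("customer", "customers"), ("client", "customers"),
--     ("contact", "customers"), ("company", "customers"),
--     ("tenant", "customers"),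
-- ]
--
-- def _auto_categorize_content(filename: str, content: str) -> str:
--     fl = filename.lower()
--     cl = content.lower()
--     best = "general"
--     for kw, cat in _KEYWORD_CATEGORY:  # lowest priority first; overwrite on match
--         if kw in fl or kw in cl:
--             best = cat
--     return best
-- ===== Notes on version B (the rewrite author's own statement) =====
-- stated objective: alternative
-- what changed: Replaces the five-branch short-circuiting elif chain with a single pass over a flat (keyword, category) list in reverse priority order, maintaining an overwrite accumulator: the last (highest-priority) matching keyword's category wins, defaulting to 'general'.
import Mathlib
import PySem

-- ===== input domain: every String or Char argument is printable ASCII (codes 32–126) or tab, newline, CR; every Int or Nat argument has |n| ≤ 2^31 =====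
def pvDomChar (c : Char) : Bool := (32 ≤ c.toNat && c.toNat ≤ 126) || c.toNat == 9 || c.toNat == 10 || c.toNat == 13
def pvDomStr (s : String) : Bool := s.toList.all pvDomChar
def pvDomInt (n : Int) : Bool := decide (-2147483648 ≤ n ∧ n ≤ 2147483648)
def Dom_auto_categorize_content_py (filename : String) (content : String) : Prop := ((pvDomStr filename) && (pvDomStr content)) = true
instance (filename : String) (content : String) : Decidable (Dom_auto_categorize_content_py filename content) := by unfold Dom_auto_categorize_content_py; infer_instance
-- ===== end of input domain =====

-- B replaces the elif chain by a single reverse-priority pass over a flat (keyword, category) list with an overwrite accumulator (alternative structure, same cost).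


-- ===== PORT A =====
def auto_categorize_content_py (filename : String) (content : String) : String :=
  let filename_lower := PySem.Str.lower filename
  let content_lower := PySem.Str.lower content
  if ["customer", "client", "contact", "company", "tenant"].any
      (fun k => PySem.Str.isIn k filename_lower || PySem.Str.isIn k content_lower) then "customers"
  else if ["product", "service", "feature", "solution", "offering"].any
      (fun k => PySem.Str.isIn k filename_lower || PySem.Str.isIn k content_lower) then "products"
  else if ["employee", "staff", "team", "personnel", "hr"].any
      (fun k => PySem.Str.isIn k filename_lower || PySem.Str.isIn k content_lower) then "employees"
  else if ["financial", "revenue", "budget", "accounting"].any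
      (fun k => PySem.Str.isIn k filename_lower || PySem.Str.isIn k content_lower) then "financial"
  else if ["process", "procedure", "workflow", "manual"].any
      (fun k => PySem.Str.isIn k filename_lower || PySem.Str.isIn k content_lower) then "processes"
  else "general"

-- ===== PORT B =====
-- flat (keyword, category) list in reverse priority order (lowest priority first)
def pvKeywordCategory : List (String × String) :=
  [("process", "processes"), ("procedure", "processes"),
   ("workflow", "processes"), ("manual", "processes"),
   ("financial", "financial"), ("revenue", "financial"),
   ("budget", "financial"), ("accounting", "financial"),
   ("employee", "employees"), ("staff", "employees"),
   ("team", "employees"), ("personnel", "employees"), ("hr", "employees"),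
   ("product", "products"), ("service", "products"),
   ("feature", "products"), ("solution", "products"),
   ("offering", "products"),
   ("customer", "customers"), ("client", "customers"),
   ("contact", "customers"), ("company", "customers"),
   ("tenant", "customers")]

def auto_categorize_content_py_alt (filename : String) (content : String) : String :=
  let fl := PySem.Str.lower filename
  let cl := PySem.Str.lower content
  pvKeywordCategory.foldl
    (fun best p => if PySem.Str.isIn p.1 fl || PySem.Str.isIn p.1 cl then p.2 else best)
    "general"

-- ===== PRECONDITION & SPEC =====
def Spec_auto_categorize_content_py (filename : String) (content : String) (out : String) : Prop := out = auto_categorize_content_py_alt filename content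
instance (filename : String) (content : String) (out : String) : Decidable (Spec_auto_categorize_content_py filename content out) := by unfold Spec_auto_categorize_content_py; infer_instance

-- ===== CLAIM =====
def Claim_equal_auto_categorize_content_py : Prop := ∀ (filename : String) (content : String), Dom_auto_categorize_content_py filename content → Spec_auto_categorize_content_py filename content (auto_categorize_content_py filename content)

-- ===== LEMMAS AND PROOFS =====
-- folding a constant-category group over the overwrite step is 'if any keyword matches then cat else acc'
theorem pv_fold_group (fl cl cat : String) :
    ∀ (kws : List String) (acc : String),
      List.foldl
        (fun best (p : String × String) =>
          if PySem.Str.isIn p.1 fl || PySem.Str.isIn p.1 cl then p.2 else best)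
        acc (kws.map (fun k => (k, cat)))
      = if kws.any (fun k => PySem.Str.isIn k fl || PySem.Str.isIn k cl) then cat else acc := by
  intro kws
  induction kws with
  | nil => intro acc; simp
  | cons k t ih =>
      intro acc
      simp only [List.map_cons, List.foldl_cons, List.any_cons]
      by_cases h : (PySem.Str.isIn k fl || PySem.Str.isIn k cl) = true
      · rw [if_pos h, ih]
        simp only [h, Bool.true_or, if_true, ite_self]
      · rw [Bool.not_eq_true] at h
        rw [if_neg (by rw [h]; decide), ih]
        simp only [h, Bool.false_or]

-- the flat list is the concatenation of the five groups, each tagged with its category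
theorem pv_flat_eq :
    pvKeywordCategory =
      (["process", "procedure", "workflow", "manual"].map (fun k => (k, "processes"))) ++
      (["financial", "revenue", "budget", "accounting"].map (fun k => (k, "financial"))) ++
      (["employee", "staff", "team", "personnel", "hr"].map (fun k => (k, "employees"))) ++
      (["product", "service", "feature", "solution", "offering"].map (fun k => (k, "products"))) ++
      (["customer", "client", "contact", "company", "tenant"].map (fun k => (k, "customers"))) := rfl

-- ===== VERDICT =====
theorem auto_categorize_content_py_spec : Claim_equal_auto_categorize_content_py := by
  intro filename content _
  unfold Spec_auto_categorize_content_py auto_categorize_content_py auto_categorize_content_py_alt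
  rw [pv_flat_eq]
  simp only [List.foldl_append, pv_fold_group]
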